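-- pv_equiv track=rewrite | github.com/alephnullplex/aoc2018 | day9/sol.py | playFast
-- ===== SOURCE A (Python) =====
-- from collections import deque
--
-- def playFast(rounds, num_players):
--     # this version uses double ended que (doublely linked list)
--     # this avoids the enourmous amount of copying the other version does
--     scores = [0 for _ in range(num_players)]
--     game_state = deque([0])
--     position = 0
--
--     for r in range(rounds):
--         player = r % len(scores)
--         value = r + 1
--         if (value % 23) == 0:
--             game_state.rotate(7)
--             scores[player] += (value + game_state.pop())
--             game_state.rotate(-1)
--         else:
--             game_state.rotate(-1)
--             game_state.append(value)
--     return scores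
-- ===== SOURCE B (Python) =====
-- def playFast(rounds, num_players):
--     # Circular doubly-linked list: cw[x]/ccw[x] give the clockwise /
--     # counter-clockwise neighbour of marble x; splice/unlink pointers
--     # instead of rotating a container.
--     scores = [0] * num_players
--     cw = {0: 0}
--     ccw = {0: 0}
--     cur = 0
--     for r in range(rounds):
--         value = r + 1
--         if value % 23 == 0:
--             for _ in range(7):
--                 cur = ccw[cur]
--             player = r % len(scores)
--             prev = ccw[cur]
--             nxt = cw[cur]
--             cw[prev] = nxt
--             ccw[nxt] = prev
--             scores[player] += value + cur
--             cur = nxt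
--         else:
--             a = cw[cur]
--             b = cw[a]
--             cw[a] = value
--             ccw[value] = a
--             cw[value] = b
--             ccw[b] = value
--             cur = value
--     return scores
-- ===== Notes on version B (the rewrite author's own statement) =====
-- stated objective: alternative
-- what changed: Represents the circle as a circular doubly-linked list (two dicts cw/ccw plus a current marble), splicing marbles in and unlinking them by pointer updates, instead of rotating a deque.
import Mathlib
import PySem

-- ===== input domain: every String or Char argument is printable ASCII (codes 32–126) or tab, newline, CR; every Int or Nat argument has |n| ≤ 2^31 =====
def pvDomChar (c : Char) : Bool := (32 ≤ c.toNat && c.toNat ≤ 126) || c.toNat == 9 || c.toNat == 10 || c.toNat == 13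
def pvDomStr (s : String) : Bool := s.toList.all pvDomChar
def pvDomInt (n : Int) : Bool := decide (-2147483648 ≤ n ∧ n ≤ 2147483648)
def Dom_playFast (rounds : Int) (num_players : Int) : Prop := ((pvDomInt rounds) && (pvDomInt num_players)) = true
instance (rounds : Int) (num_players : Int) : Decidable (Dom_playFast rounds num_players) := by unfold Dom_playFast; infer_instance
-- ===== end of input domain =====

-- B replaces A's rotating deque by a circular doubly-linked list held in two dicts
-- (cw/ccw pointers spliced per move); return values agree (no argument is mutated).

-- ===== PORT A =====
-- collections.deque is ported as a two-stack deque: (front, back) holds the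
-- sequence front ++ back.reverse; a pop on an exhausted stack splits the other
-- stack in half (exact for every deque operation A performs)
def dqPopRight (d : List Int × List Int) : Int × (List Int × List Int) :=
  match d with
  | (f, x :: b) => (x, (f, b))
  | (f, []) =>
    match f.reverse with
    | [] => (0, ([], []))      -- pop() of an empty deque: IndexError, unreachable under Pre_
    | x :: rest =>
      let l := rest.reverse
      (x, (l.take (l.length / 2), (l.drop (l.length / 2)).reverse))

def dqPopLeft (d : List Int × List Int) : Int × (List Int × List Int) :=
  match d with
  | (x :: f, b) => (x, (f, b))
  | ([], b) =>
    match b.reverse with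
    | [] => (0, ([], []))      -- popleft() of an empty deque: IndexError, unreachable under Pre_
    | x :: rest =>
      (x, (rest.take (rest.length / 2), (rest.drop (rest.length / 2)).reverse))

-- deque.rotate(1): pop on the right, push on the left
def dqRotOne (d : List Int × List Int) : List Int × List Int :=
  let p := dqPopRight d
  (p.1 :: p.2.1, p.2.2)

-- deque.rotate(7) = seven single rotations
def dqRotMany : Nat → (List Int × List Int) → List Int × List Int
  | 0, d => d
  | n + 1, d => dqRotMany n (dqRotOne d)

-- deque.rotate(-1): pop on the left, push on the right
def dqRotNegOne (d : List Int × List Int) : List Int × List Int :=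
  let p := dqPopLeft d
  (p.2.1, p.1 :: p.2.2)

-- deque.append(v)
def dqAppend (v : Int) (d : List Int × List Int) : List Int × List Int :=
  (d.1, v :: d.2)

-- one iteration of A's `for r in range(rounds)` loop; state = (scores, game_state)
def stepA (st : List Int × (List Int × List Int)) (r : Int) :
    List Int × (List Int × List Int) :=
  let scores := st.1
  let d := st.2
  let player := PySem.Int.mod r (PySem.List.len scores)
  let value := r + 1
  if PySem.Int.mod value 23 == 0 then
    let d1 := dqRotMany 7 d
    let p := dqPopRight d1
    (PySem.List.pySetD scores player (PySem.List.pyGetD scores player 0 + (value + p.1)),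
     dqRotNegOne p.2)
  else
    (scores, dqAppend value (dqRotNegOne d))

def playFast (rounds : Int) (num_players : Int) : List Int :=
  let scores := (PySem.List.pyRange 0 num_players 1).map (fun _ => (0 : Int))
  ((PySem.List.pyRange 0 rounds 1).foldl stepA (scores, ([0], []))).1

-- ===== PORT B =====
-- one iteration of B's loop; state = (scores, (cw, ccw, cur)).  Python's dicts are
-- ported as Std.HashMap Int Int (B only uses d[k] lookups and d[k] = v stores, on
-- which HashMap is exact); the lookups cw[x]/ccw[x] are ported as getD with
-- default 0: under Pre_ every key looked up is a live circle member and is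
-- present, so KeyError is unreachable
def stepB (st : List Int × (Std.HashMap Int Int × Std.HashMap Int Int × Int)) (r : Int) :
    List Int × (Std.HashMap Int Int × Std.HashMap Int Int × Int) :=
  let scores := st.1
  let cw := st.2.1
  let ccw := st.2.2.1
  let cur := st.2.2.2
  let value := r + 1
  if PySem.Int.mod value 23 == 0 then
    -- for _ in range(7): cur = ccw[cur]
    let cur := (PySem.List.pyRange 0 7 1).foldl (fun c _ => ccw.getD c 0) cur
    let player := PySem.Int.mod r (PySem.List.len scores)
    let prev := ccw.getD cur 0
    let nxt := cw.getD cur 0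
    let cw := cw.insert prev nxt
    let ccw := ccw.insert nxt prev
    let scores := PySem.List.pySetD scores player
      (PySem.List.pyGetD scores player 0 + (value + cur))
    (scores, cw, ccw, nxt)
  else
    let a := cw.getD cur 0
    let b := cw.getD a 0
    let cw := cw.insert a value
    let ccw := ccw.insert value a
    let cw := cw.insert value b
    let ccw := ccw.insert b value
    (scores, cw, ccw, value)

def playFast_alt (rounds : Int) (num_players : Int) : List Int :=
  let scores := PySem.List.pyRepeat [(0 : Int)] num_players
  ((PySem.List.pyRange 0 rounds 1).foldl stepB
      (scores, ((∅ : Std.HashMap Int Int).insert 0 0,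
                (∅ : Std.HashMap Int Int).insert 0 0, 0))).1

-- ===== PRECONDITION & SPEC =====
-- Pre_ excludes exactly the inputs where A raises: 0 < rounds with num_players ≤ 0 makes
-- scores empty and `r % len(scores)` a ZeroDivisionError on the first iteration.
def Pre_playFast (rounds : Int) (num_players : Int) : Prop := rounds ≤ 0 ∨ 0 < num_players
instance (rounds : Int) (num_players : Int) : Decidable (Pre_playFast rounds num_players) := by
  unfold Pre_playFast; infer_instance

def pvWitness_playFast : Int × Int := (25, 9)

def Spec_playFast (rounds : Int) (num_players : Int) (out : List Int) : Prop := out = playFast_alt rounds num_players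
instance (rounds : Int) (num_players : Int) (out : List Int) : Decidable (Spec_playFast rounds num_players out) := by unfold Spec_playFast; infer_instance

-- ===== CLAIM (what is proved, stated in full; the proofs are below) =====
def Claim_equal_playFast : Prop := ∀ (rounds : Int) (num_players : Int), Dom_playFast rounds num_players → Pre_playFast rounds num_players → Spec_playFast rounds num_players (playFast rounds num_players)

-- ===== LEMMAS AND PROOFS =====

-- the cyclic adjacency pairs of a circle list: (x, successor of x), wrapping around
def shiftZip : List Int → Int → List (Int × Int)
  | [], _ => []
  | [c], x => [(c, x)]
  | c :: d :: t, x => (c, d) :: shiftZip (d :: t) x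

def cyclicPairs : List Int → List (Int × Int)
  | [] => []
  | c :: cs => shiftZip (c :: cs) c

-- the linked-list dicts realise circle C: both pointer lookups agree with adjacency
def CircOK (cw ccw : Std.HashMap Int Int) (C : List Int) : Prop :=
  ∀ p ∈ cyclicPairs C, cw.getD p.1 0 = p.2 ∧ ccw.getD p.2 0 = p.1

-- loop invariant of the simulation, at round r, for circle C (clockwise from cur)
def PvInv (r : Int) (cw ccw : Std.HashMap Int Int) (cur : Int) (C : List Int) : Prop :=
  C ≠ [] ∧ C.Nodup ∧ C.headD 0 = cur ∧ (∀ x ∈ C, 0 ≤ x ∧ x ≤ r) ∧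
  (C.length : Int) = 1 + r - 2 * (r / 23) ∧ CircOK cw ccw C

-- Python dict semantics for the two operations B uses, on Std.HashMap
theorem hmGetD_insert (m : Std.HashMap Int Int) (k k' v : Int) :
    (m.insert k v).getD k' 0 = if k' = k then v else m.getD k' 0 := by
  rw [Std.HashMap.getD_insert]
  by_cases h : k' = k
  · simp [h]
  · rw [if_neg h, if_neg (by simpa [beq_iff_eq] using Ne.symm h)]

-- the abstract deque: the plain list a two-stack deque state denotes
def dqAbs (d : List Int × List Int) : List Int := d.1 ++ d.2.reverse

-- list-level deque operations (rotate 1 / rotate -1 / rotate 7 / pop)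
def dqRotCW (d : List Int) : List Int :=
  match d.reverse with
  | [] => []
  | c :: rest => c :: rest.reverse

def dqRotN : Nat → List Int → List Int
  | 0, d => d
  | n + 1, d => dqRotN n (dqRotCW d)

def dqRotNeg1 (d : List Int) : List Int :=
  match d with
  | [] => []
  | h :: t => t ++ [h]

def dqPop (d : List Int) : Int × List Int :=
  match d.reverse with
  | [] => (0, [])
  | c :: rest => (c, rest.reverse)

-- A's loop body at the abstract (plain list) level
def listStepA (st : List Int × List Int) (r : Int) : List Int × List Int :=
  let scores := st.1
  let d := st.2
  let player := PySem.Int.mod r (PySem.List.len scores)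
  let value := r + 1
  if PySem.Int.mod value 23 == 0 then
    let d1 := dqRotN 7 d
    let p := dqPop d1
    (PySem.List.pySetD scores player (PySem.List.pyGetD scores player 0 + (value + p.1)),
     dqRotNeg1 p.2)
  else
    (scores, dqRotNeg1 d ++ [value])

-- basic deque-rotation facts (the abstract circle, clockwise from the current marble)
theorem dqRotCW_concat (xs : List Int) (v : Int) : dqRotCW (xs ++ [v]) = v :: xs := by
  simp [dqRotCW]

theorem dqRotNeg1_dqRotCW (d : List Int) : dqRotNeg1 (dqRotCW d) = d := by
  rcases h : d.reverse with _ | ⟨c, rest⟩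
  · simp_all [dqRotCW, dqRotNeg1, List.reverse_eq_nil_iff]
  · have hd : d = rest.reverse ++ [c] := by
      have := congrArg List.reverse h; simpa using this
    simp [dqRotCW, dqRotNeg1, hd]

theorem dqRotCW_dqRotNeg1 (d : List Int) : dqRotCW (dqRotNeg1 d) = d := by
  cases d with
  | nil => rfl
  | cons h t => simp [dqRotNeg1, dqRotCW_concat]

theorem dqPop_eq (d : List Int) : dqPop d = ((dqRotCW d).headD 0, (dqRotCW d).tail) := by
  rcases h : d.reverse with _ | ⟨c, rest⟩ <;> simp [dqPop, dqRotCW, h]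

theorem dqRotCW_dqRotN (n : Nat) (d : List Int) :
    dqRotCW (dqRotN n d) = dqRotN n (dqRotCW d) := by
  induction n generalizing d with
  | zero => rfl
  | succ n ih => simp [dqRotN, ih]

theorem perm_dqRotCW (d : List Int) : List.Perm (dqRotCW d) d := by
  rcases h : d.reverse with _ | ⟨c, rest⟩
  · simp_all [dqRotCW, List.reverse_eq_nil_iff]
  · have hd : d = rest.reverse ++ [c] := by
      have := congrArg List.reverse h; simpa using this
    rw [hd, dqRotCW]
    simp only [List.reverse_append, List.reverse_cons, List.reverse_nil, List.nil_append,
      List.singleton_append, List.reverse_reverse]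
    exact (List.perm_append_singleton c rest.reverse).symm

theorem perm_dqRotNeg1 (d : List Int) : List.Perm (dqRotNeg1 d) d := by
  cases d with
  | nil => rfl
  | cons h t => exact List.perm_append_singleton h t

theorem dqRotCW_ne_nil (d : List Int) (h : d ≠ []) : dqRotCW d ≠ [] := by
  rcases hr : d.reverse with _ | ⟨c, rest⟩
  · simp_all [List.reverse_eq_nil_iff]
  · simp [dqRotCW, hr]

theorem dqRotNeg1_ne_nil (C : List Int) (h : C ≠ []) : dqRotNeg1 C ≠ [] := by
  cases C <;> simp_all [dqRotNeg1]

theorem perm_dqRotN (n : Nat) (d : List Int) : List.Perm (dqRotN n d) d := by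
  induction n generalizing d with
  | zero => exact List.Perm.refl d
  | succ n ih => exact (ih (dqRotCW d)).trans (perm_dqRotCW d)

theorem dqRotN_ne_nil (n : Nat) (d : List Int) (h : d ≠ []) : dqRotN n d ≠ [] := by
  induction n generalizing d with
  | zero => exact h
  | succ n ih => exact ih _ (dqRotCW_ne_nil d h)

theorem shiftZip_mem (l : List Int) (x : Int) (p : Int × Int) (hp : p ∈ shiftZip l x) :
    p.1 ∈ l ∧ p.2 ∈ l.tail ++ [x] := by
  induction l with
  | nil => simp [shiftZip] at hp
  | cons c l ih =>
    cases l with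
    | nil => simp [shiftZip] at hp; simp [hp]
    | cons d t =>
      rcases (by simpa [shiftZip] using hp : p = (c, d) ∨ p ∈ shiftZip (d :: t) x) with h | h
      · simp [h]
      · obtain ⟨h1, h2⟩ := ih h
        constructor
        · exact List.mem_cons_of_mem _ h1
        · simp at h2 ⊢; tauto

theorem shiftZip_snoc (l : List Int) (e x : Int) :
    shiftZip (l ++ [e]) x = shiftZip l e ++ [(e, x)] := by
  induction l with
  | nil => simp [shiftZip]
  | cons c l ih =>
    cases l with
    | nil => simp [shiftZip]
    | cons d t => simpa [shiftZip] using ih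

theorem shiftZip_cons (c : Int) (l : List Int) (x : Int) (h : l ≠ []) :
    shiftZip (c :: l) x = (c, l.headD 0) :: shiftZip l x := by
  cases l with
  | nil => simp_all
  | cons d t => simp [shiftZip]

theorem cyclicPairs_eq (l : List Int) (h : l ≠ []) :
    cyclicPairs l = shiftZip l (l.headD 0) := by
  cases l with
  | nil => simp_all
  | cons c cs => simp [cyclicPairs]

theorem shiftZip_tail_subset (t : List Int) (a : Int) (p : Int × Int)
    (hp : p ∈ shiftZip t a) : p ∈ cyclicPairs (a :: t) := by
  cases t with
  | nil => simp [shiftZip] at hp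
  | cons g gs => simp [cyclicPairs, shiftZip]; right; exact hp

theorem cp_mem_rotNeg1 (C : List Int) (p : Int × Int) :
    p ∈ cyclicPairs (dqRotNeg1 C) ↔ p ∈ cyclicPairs C := by
  cases C with
  | nil => simp [dqRotNeg1]
  | cons c cs =>
    cases cs with
    | nil => simp [dqRotNeg1, cyclicPairs, shiftZip]
    | cons g t =>
      have h1 : cyclicPairs (c :: g :: t) = (c, g) :: shiftZip (g :: t) c := by
        simp [cyclicPairs, shiftZip]
      have h2 : cyclicPairs ((g :: t) ++ [c]) = shiftZip (g :: t) c ++ [(c, g)] := by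
        rw [cyclicPairs_eq _ (by simp), shiftZip_snoc]
        simp
      rw [show dqRotNeg1 (c :: g :: t) = (g :: t) ++ [c] from rfl, h1, h2]
      simp [or_comm]

theorem cp_mem_rotCW (C : List Int) (p : Int × Int) :
    p ∈ cyclicPairs (dqRotCW C) ↔ p ∈ cyclicPairs C := by
  rw [← cp_mem_rotNeg1 (dqRotCW C), dqRotNeg1_dqRotCW]

theorem cp_mem_dqRotN (n : Nat) (C : List Int) (p : Int × Int) :
    p ∈ cyclicPairs (dqRotN n C) ↔ p ∈ cyclicPairs C := by
  induction n generalizing C with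
  | zero => exact Iff.rfl
  | succ n ih => exact (ih (dqRotCW C)).trans (cp_mem_rotCW C p)

theorem head_pair_mem (C : List Int) (h : C ≠ []) :
    (C.headD 0, (dqRotNeg1 C).headD 0) ∈ cyclicPairs C := by
  cases C with
  | nil => simp_all
  | cons c cs =>
    cases cs with
    | nil => simp [dqRotNeg1, cyclicPairs, shiftZip]
    | cons g t => simp [dqRotNeg1, cyclicPairs, shiftZip]

theorem circOK_getD_head (cw ccw : Std.HashMap Int Int) (C : List Int) (h : C ≠ [])
    (hok : CircOK cw ccw C) : cw.getD (C.headD 0) 0 = (dqRotNeg1 C).headD 0 :=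
  (hok _ (head_pair_mem C h)).1

theorem circOK_getD_head_ccw (cw ccw : Std.HashMap Int Int) (C : List Int) (h : C ≠ [])
    (hok : CircOK cw ccw C) : ccw.getD (C.headD 0) 0 = (dqRotCW C).headD 0 := by
  have h' := head_pair_mem (dqRotCW C) (dqRotCW_ne_nil C h)
  rw [dqRotNeg1_dqRotCW] at h'
  exact (hok _ ((cp_mem_rotCW C _).mp h')).2

theorem circOK_dqRotN (cw ccw : Std.HashMap Int Int) (C : List Int) (n : Nat)
    (hok : CircOK cw ccw C) : CircOK cw ccw (dqRotN n C) :=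
  fun p hp => hok p ((cp_mem_dqRotN n C p).mp hp)

theorem foldl_const_iterate (l : List Int) (f : Int → Int) (c : Int) :
    l.foldl (fun c _ => f c) c = f^[l.length] c := by
  induction l generalizing c with
  | nil => rfl
  | cons x l ih => simp [List.foldl_cons, ih, Function.iterate_succ_apply]

theorem walk_n (cw ccw : Std.HashMap Int Int) (n : Nat) : ∀ (C : List Int), C ≠ [] →
    CircOK cw ccw C →
    (fun c => ccw.getD c 0)^[n] (C.headD 0) = (dqRotN n C).headD 0 := by
  induction n with
  | zero => intro C _ _; rfl
  | succ n ih =>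
    intro C hne hok
    rw [Function.iterate_succ_apply]
    have h1 : ccw.getD (C.headD 0) 0 = (dqRotCW C).headD 0 :=
      circOK_getD_head_ccw cw ccw C hne hok
    have h2 := ih (dqRotCW C) (dqRotCW_ne_nil C hne)
      (fun p hp => hok p ((cp_mem_rotCW C p).mp hp))
    rw [h1]
    simpa [dqRotN] using h2

theorem circOK_insert (cw ccw : Std.HashMap Int Int) (C : List Int) (v : Int)
    (hne : C ≠ []) (hnd : C.Nodup) (hv : v ∉ C) (hok : CircOK cw ccw C) :
    CircOK ((cw.insert (cw.getD (C.headD 0) 0) v).insert v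
              (cw.getD (cw.getD (C.headD 0) 0) 0))
           ((ccw.insert v (cw.getD (C.headD 0) 0)).insert
              (cw.getD (cw.getD (C.headD 0) 0) 0) v)
           (v :: dqRotNeg1 (dqRotNeg1 C)) := by
  have hC1ne := dqRotNeg1_ne_nil C hne
  have hokC1 : CircOK cw ccw (dqRotNeg1 C) :=
    fun p hp => hok p ((cp_mem_rotNeg1 C p).mp hp)
  have hndC1 : (dqRotNeg1 C).Nodup := (perm_dqRotNeg1 C).nodup_iff.mpr hnd
  have hvC1 : v ∉ dqRotNeg1 C := fun h => hv ((perm_dqRotNeg1 C).mem_iff.mp h)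
  have ha : cw.getD (C.headD 0) 0 = (dqRotNeg1 C).headD 0 :=
    circOK_getD_head cw ccw C hne hok
  have hb0 := circOK_getD_head cw ccw (dqRotNeg1 C) hC1ne hokC1
  obtain ⟨a', t, hC1⟩ := List.exists_cons_of_ne_nil hC1ne
  rw [hC1] at hokC1 hndC1 hvC1 hb0
  simp only [List.headD_cons] at hb0
  have hb : cw.getD a' 0 = (t ++ [a']).headD 0 := by
    rw [hb0]; rfl
  rw [ha, hC1]
  simp only [List.headD_cons]
  rw [hb]
  have h2 : dqRotNeg1 (a' :: t) = t ++ [a'] := rfl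
  rw [h2]
  have hcp : cyclicPairs (v :: (t ++ [a'])) =
      (v, (t ++ [a']).headD 0) :: (shiftZip t a' ++ [(a', v)]) := by
    rw [cyclicPairs, shiftZip_cons v _ _ (by simp), shiftZip_snoc]
  intro p hp
  rw [hcp] at hp
  have hvne_a : v ≠ a' := fun h => hvC1 (h ▸ List.mem_cons_self)
  have ha_nt : a' ∉ t := (List.nodup_cons.mp hndC1).1
  have hbC1 : (t ++ [a']).headD 0 ∈ a' :: t := by
    cases t with
    | nil => simp
    | cons g gs => simp
  have hvb : v ≠ (t ++ [a']).headD 0 := fun h => hvC1 (h ▸ hbC1)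
  rcases List.mem_cons.mp hp with hP | hP
  · -- p = (v, b)
    subst hP
    refine ⟨?_, ?_⟩
    · rw [hmGetD_insert, if_pos rfl]
    · rw [hmGetD_insert, if_pos rfl]
  · rcases List.mem_append.mp hP with hP | hP
    · -- middle pair of the old circle
      obtain ⟨hp1, hp2⟩ := shiftZip_mem t a' p hP
      have hmem : p ∈ cyclicPairs (a' :: t) := shiftZip_tail_subset t a' p hP
      obtain ⟨hcw, hccw⟩ := hokC1 p hmem
      have hp1C : p.1 ∈ a' :: t := List.mem_cons_of_mem _ hp1
      have hp2C : p.2 ∈ a' :: t := by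
        rcases List.mem_append.mp hp2 with h | h
        · exact List.mem_cons_of_mem _ (List.mem_of_mem_tail h)
        · simp at h; simp [h]
      have h1v : p.1 ≠ v := fun h => hvC1 (h ▸ hp1C)
      have h1a : p.1 ≠ a' := fun h => ha_nt (h ▸ hp1)
      have h2v : p.2 ≠ v := fun h => hvC1 (h ▸ hp2C)
      have h2b : p.2 ≠ (t ++ [a']).headD 0 := by
        cases t with
        | nil => simp [shiftZip] at hP
        | cons g gs =>
          simp only [List.cons_append, List.headD_cons]
          have hnd2 := hndC1
          simp [List.nodup_cons] at hnd2
          have hgm : g ∉ gs ++ [a'] := by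
            intro h; rcases List.mem_append.mp h with h | h
            · exact hnd2.2.1 h
            · simp at h; exact hnd2.1.1 h.symm
          have hmem2 : p.2 ∈ gs ++ [a'] := by simpa using hp2
          exact fun h => hgm (h ▸ hmem2)
      refine ⟨?_, ?_⟩
      · rw [hmGetD_insert, if_neg h1v, hmGetD_insert, if_neg h1a]
        exact hcw
      · rw [hmGetD_insert, if_neg h2b, hmGetD_insert, if_neg h2v]
        exact hccw
    · -- p = (a', v)
      simp only [List.mem_singleton] at hP
      subst hP
      refine ⟨?_, ?_⟩
      · rw [hmGetD_insert, if_neg hvne_a.symm, hmGetD_insert, if_pos rfl]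
      · rw [hmGetD_insert, if_neg hvb, hmGetD_insert, if_pos rfl]

theorem circOK_remove (cw ccw : Std.HashMap Int Int) (E : List Int)
    (hlen : 2 ≤ E.length) (hnd : E.Nodup) (hok : CircOK cw ccw E) :
    CircOK (cw.insert (ccw.getD (E.headD 0) 0) (cw.getD (E.headD 0) 0))
           (ccw.insert (cw.getD (E.headD 0) 0) (ccw.getD (E.headD 0) 0))
           E.tail := by
  have hEne : E ≠ [] := by intro h; rw [h] at hlen; simp at hlen
  obtain ⟨e, es, rfl⟩ := List.exists_cons_of_ne_nil hEne
  have hesne : es ≠ [] := by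
    intro h; rw [h] at hlen; simp at hlen
  obtain ⟨ds, dl, hds⟩ := es.eq_nil_or_concat.resolve_left hesne
  rw [List.concat_eq_append] at hds
  have hndes : es.Nodup := (List.nodup_cons.mp hnd).2
  -- the two pointer lookups
  have hnxt : cw.getD ((e :: es).headD 0) 0 = es.headD 0 := by
    have := circOK_getD_head cw ccw (e :: es) (by simp) hok
    rw [this]
    cases es with
    | nil => exact absurd rfl hesne
    | cons g gs => rfl
  have hprev : ccw.getD ((e :: es).headD 0) 0 = dl := by
    have := circOK_getD_head_ccw cw ccw (e :: es) (by simp) hok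
    rw [this, hds, ← List.cons_append, dqRotCW_concat]
    rfl
  rw [hnxt, hprev]
  -- pair decompositions
  have hcpE : cyclicPairs (e :: es) = (e, es.headD 0) :: (shiftZip ds dl ++ [(dl, e)]) := by
    rw [cyclicPairs, shiftZip_cons e es e hesne, hds, shiftZip_snoc]
  have hcpes : cyclicPairs es = shiftZip ds dl ++ [(dl, es.headD 0)] := by
    rw [cyclicPairs_eq es hesne, hds, shiftZip_snoc]
  have hdlds : dl ∉ ds := by
    have h := hndes
    rw [hds] at h
    have := List.disjoint_of_nodup_append h
    simpa [List.disjoint_singleton] using this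
  show CircOK _ _ es
  intro p hp
  rw [hcpes] at hp
  rcases List.mem_append.mp hp with hP | hP
  · obtain ⟨hp1, hp2⟩ := shiftZip_mem ds dl p hP
    have hmem : p ∈ cyclicPairs (e :: es) := by
      rw [hcpE]
      exact List.mem_cons_of_mem _ (List.mem_append_left _ hP)
    obtain ⟨hcw, hccw⟩ := hok p hmem
    have h1 : p.1 ≠ dl := fun h => hdlds (h ▸ hp1)
    have h2 : p.2 ≠ es.headD 0 := by
      cases ds with
      | nil => simp [shiftZip] at hP
      | cons h0 hs =>
        have hg : es.headD 0 = h0 := by rw [hds]; rfl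
        rw [hg]
        have hndes' := hndes
        rw [hds] at hndes'
        have hh0 : h0 ∉ hs ++ [dl] := by
          simpa using (List.nodup_cons.mp (by simpa using hndes' : (h0 :: (hs ++ [dl])).Nodup)).1
        have hmem2 : p.2 ∈ hs ++ [dl] := by simpa using hp2
        exact fun h => hh0 (h ▸ hmem2)
    refine ⟨?_, ?_⟩
    · rw [hmGetD_insert, if_neg h1]; exact hcw
    · rw [hmGetD_insert, if_neg h2]; exact hccw
  · simp only [List.mem_singleton] at hP
    subst hP
    refine ⟨?_, ?_⟩
    · rw [hmGetD_insert, if_pos rfl]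
    · rw [hmGetD_insert, if_pos rfl]

theorem step_sim (r : Int) (hr : 0 ≤ r) (s d : List Int)
    (cw ccw : Std.HashMap Int Int) (cur : Int) (C : List Int)
    (habs : dqRotCW d = C) (hinv : PvInv r cw ccw cur C) :
    (listStepA (s, d) r).1 = (stepB (s, (cw, ccw, cur)) r).1 ∧
      PvInv (r + 1) (stepB (s, (cw, ccw, cur)) r).2.1 (stepB (s, (cw, ccw, cur)) r).2.2.1
        (stepB (s, (cw, ccw, cur)) r).2.2.2 (dqRotCW (listStepA (s, d) r).2) := by
  obtain ⟨hne, hnd, hcur, hbnd, hlen, hok⟩ := hinv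
  have hmodeq : PySem.Int.mod (r + 1) 23 = (r + 1) % 23 :=
    PySem.Int.mod_eq_emod_of_pos (by norm_num)
  have hv : (r + 1) ∉ C := fun h => by have := (hbnd _ h).2; omega
  have hd : d = dqRotNeg1 C := by rw [← habs, dqRotNeg1_dqRotCW]
  by_cases hc : PySem.Int.mod (r + 1) 23 = 0
  · -- multiple of 23: unlink
    have hc' : (r + 1) % 23 = 0 := by rw [← hmodeq]; exact hc
    have hcb : (PySem.Int.mod (r + 1) 23 == 0) = true := by rw [hc]; rfl
    simp only [listStepA, stepB, hcb, if_true]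
    have hEabs : dqRotCW (dqRotN 7 d) = dqRotN 7 C := by
      rw [dqRotCW_dqRotN, habs]
    have hEne := dqRotN_ne_nil 7 C hne
    have hpermE : List.Perm (dqRotN 7 C) C := perm_dqRotN 7 C
    have hndE : (dqRotN 7 C).Nodup := hpermE.nodup_iff.mpr hnd
    have hokE : CircOK cw ccw (dqRotN 7 C) := circOK_dqRotN cw ccw C 7 hok
    have hlenE : (dqRotN 7 C).length = C.length := hpermE.length_eq
    have hlen2 : 2 ≤ (dqRotN 7 C).length := by
      rw [hlenE]; omega
    have hwalk : (PySem.List.pyRange 0 7 1).foldl (fun c _ => ccw.getD c 0) cur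
        = (dqRotN 7 C).headD 0 := by
      rw [foldl_const_iterate]
      have hlen7 : (PySem.List.pyRange 0 7 1).length = 7 := by decide
      rw [hlen7, ← hcur]
      exact walk_n cw ccw 7 C hne hok
    rw [dqPop_eq, hEabs, hwalk]
    dsimp only
    obtain ⟨e, es, hE⟩ := List.exists_cons_of_ne_nil hEne
    have hesne : es ≠ [] := by
      intro h; rw [hE, h] at hlen2; simp at hlen2
    have htl : (dqRotNeg1 (dqRotN 7 C)).headD 0 = (dqRotN 7 C).tail.headD 0 := by
      rw [hE]
      cases es with
      | nil => exact absurd rfl hesne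
      | cons g gs => rfl
    have hnxt : cw.getD ((dqRotN 7 C).headD 0) 0 = (dqRotN 7 C).tail.headD 0 := by
      rw [circOK_getD_head cw ccw _ hEne hokE, htl]
    refine ⟨rfl, ?_⟩
    rw [dqRotCW_dqRotNeg1]
    refine ⟨?_, ?_, ?_, ?_, ?_, ?_⟩
    · rw [hE]; simpa using hesne
    · rw [hE]; exact (List.nodup_cons.mp (hE ▸ hndE)).2
    · exact hnxt.symm
    · intro x hx
      have hxC : x ∈ C := hpermE.mem_iff.mp (List.mem_of_mem_tail hx)
      have := hbnd x hxC
      omega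
    · have htlen : (dqRotN 7 C).tail.length = C.length - 1 := by
        rw [hE] at hlenE ⊢
        simp only [List.length_cons] at hlenE
        simp only [List.tail_cons]
        omega
      omega
    · exact circOK_remove cw ccw _ hlen2 hndE hokE
  · -- ordinary marble: splice in
    have hc' : (r + 1) % 23 ≠ 0 := by rw [← hmodeq]; exact hc
    have hcb : (PySem.Int.mod (r + 1) 23 == 0) = false := by rw [beq_eq_false_iff_ne]; exact hc
    simp only [listStepA, stepB, hcb, Bool.false_eq_true, if_false]
    refine ⟨by trivial, ?_⟩
    rw [hd, dqRotCW_concat]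
    have hperm2 : List.Perm (dqRotNeg1 (dqRotNeg1 C)) C :=
      (perm_dqRotNeg1 _).trans (perm_dqRotNeg1 C)
    refine ⟨by simp, ?_, rfl, ?_, ?_, ?_⟩
    · refine List.nodup_cons.mpr ⟨fun h => hv (hperm2.mem_iff.mp h), ?_⟩
      exact hperm2.nodup_iff.mpr hnd
    · intro x hx
      rcases List.mem_cons.mp hx with h | h
      · omega
      · have := hbnd x (hperm2.mem_iff.mp h); omega
    · have : (dqRotNeg1 (dqRotNeg1 C)).length = C.length := hperm2.length_eq
      simp only [List.length_cons, this]
      push_cast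
      omega
    · rw [← hcur]
      exact circOK_insert cw ccw C (r + 1) hne hnd hv hok

theorem pyRange_one_nil (a b : Int) (h : b ≤ a) : PySem.List.pyRange a b 1 = [] := by
  simp [PySem.List.pyRange_one]; omega

theorem cons_headD_tail (l : List Int) (h : l ≠ []) : l.headD 0 :: l.tail = l := by
  cases l <;> simp_all

theorem abs_popRight (d : List Int × List Int) (h : dqAbs d ≠ []) :
    (dqPopRight d).1 = (dqRotCW (dqAbs d)).headD 0 ∧
      dqAbs (dqPopRight d).2 = (dqRotCW (dqAbs d)).tail := by
  obtain ⟨f, b⟩ := d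
  cases b with
  | cons x b' =>
    have habs : dqAbs (f, x :: b') = (f ++ b'.reverse) ++ [x] := by
      simp [dqAbs]
    rw [habs, dqRotCW_concat]
    simp [dqPopRight, dqAbs]
  | nil =>
    have hf : f ≠ [] := by simpa [dqAbs] using h
    rcases hr : f.reverse with _ | ⟨x, rest⟩
    · simp_all [List.reverse_eq_nil_iff]
    · have hfd : f = rest.reverse ++ [x] := by
        have := congrArg List.reverse hr; simpa using this
      constructor
      · simp [dqPopRight, dqAbs, hfd, dqRotCW_concat]
      · simp [dqPopRight, dqAbs, hfd, dqRotCW_concat, List.take_append_drop]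

theorem abs_popLeft (d : List Int × List Int) (h : dqAbs d ≠ []) :
    (dqPopLeft d).1 = (dqAbs d).headD 0 ∧ dqAbs (dqPopLeft d).2 = (dqAbs d).tail := by
  obtain ⟨f, b⟩ := d
  cases f with
  | cons x f' => simp [dqPopLeft, dqAbs]
  | nil =>
    have hb : b.reverse ≠ [] := by simpa [dqAbs] using h
    rcases hr : b.reverse with _ | ⟨x, rest⟩
    · exact absurd hr hb
    · constructor <;> simp [dqPopLeft, hr, dqAbs, List.take_append_drop]

theorem abs_rotOne (d : List Int × List Int) (h : dqAbs d ≠ []) :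
    dqAbs (dqRotOne d) = dqRotCW (dqAbs d) := by
  obtain ⟨h1, h2⟩ := abs_popRight d h
  have hrw : dqAbs (dqRotOne d) = (dqPopRight d).1 :: dqAbs (dqPopRight d).2 := by
    simp [dqRotOne, dqAbs]
  rw [hrw, h1, h2, cons_headD_tail _ (dqRotCW_ne_nil _ h)]

theorem abs_rotMany (n : Nat) : ∀ (d : List Int × List Int), dqAbs d ≠ [] →
    dqAbs (dqRotMany n d) = dqRotN n (dqAbs d) := by
  induction n with
  | zero => intro d _; rfl
  | succ n ih =>
    intro d h
    have h1 := abs_rotOne d h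
    have h2 : dqAbs (dqRotOne d) ≠ [] := by rw [h1]; exact dqRotCW_ne_nil _ h
    simp only [dqRotMany, dqRotN]
    rw [ih _ h2, h1]

theorem abs_rotNegOne (d : List Int × List Int) (h : dqAbs d ≠ []) :
    dqAbs (dqRotNegOne d) = dqRotNeg1 (dqAbs d) := by
  obtain ⟨h1, h2⟩ := abs_popLeft d h
  have hrw : dqAbs (dqRotNegOne d) = dqAbs (dqPopLeft d).2 ++ [(dqPopLeft d).1] := by
    simp [dqRotNegOne, dqAbs]
  rw [hrw, h1, h2]
  cases habs : dqAbs d with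
  | nil => exact absurd habs h
  | cons y t => simp [dqRotNeg1]

theorem abs_append (v : Int) (d : List Int × List Int) :
    dqAbs (dqAppend v d) = dqAbs d ++ [v] := by
  simp [dqAppend, dqAbs]

-- the two-stack port of A's loop body refines the abstract list-level body
theorem step_ref (r : Int) (s : List Int) (dq : List Int × List Int) (C : List Int)
    (hC : dqRotCW (dqAbs dq) = C) (hne : C ≠ [])
    (h23 : PySem.Int.mod (r + 1) 23 = 0 → 2 ≤ C.length) :
    (stepA (s, dq) r).1 = (listStepA (s, dqAbs dq) r).1 ∧
      dqAbs (stepA (s, dq) r).2 = (listStepA (s, dqAbs dq) r).2 := by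
  have habsne : dqAbs dq ≠ [] := by
    intro h; rw [h] at hC; exact hne hC.symm
  by_cases hc : PySem.Int.mod (r + 1) 23 = 0
  · have hcb : (PySem.Int.mod (r + 1) 23 == 0) = true := by rw [hc]; rfl
    simp only [stepA, listStepA, hcb, if_true]
    have habs7 : dqAbs (dqRotMany 7 dq) = dqRotN 7 (dqAbs dq) := abs_rotMany 7 dq habsne
    have habs7ne : dqAbs (dqRotMany 7 dq) ≠ [] := by
      rw [habs7]; exact dqRotN_ne_nil 7 _ habsne
    obtain ⟨hp1, hp2⟩ := abs_popRight _ habs7ne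
    rw [habs7] at hp1 hp2
    rw [dqPop_eq]
    refine ⟨by rw [hp1], ?_⟩
    have htailne : dqAbs (dqPopRight (dqRotMany 7 dq)).2 ≠ [] := by
      rw [hp2]
      have hlen : (dqRotCW (dqRotN 7 (dqAbs dq))).length = C.length := by
        rw [dqRotCW_dqRotN, hC]
        exact (perm_dqRotN 7 C).length_eq
      have h2 := h23 hc
      intro hnil
      have hlt := congrArg List.length hnil
      simp [List.length_tail] at hlt
      omega
    rw [abs_rotNegOne _ htailne, hp2]
  · have hcb : (PySem.Int.mod (r + 1) 23 == 0) = false := by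
      rw [beq_eq_false_iff_ne]; exact hc
    simp only [stepA, listStepA, hcb, Bool.false_eq_true, if_false]
    refine ⟨by trivial, ?_⟩
    rw [abs_append, abs_rotNegOne _ habsne]

theorem fold_sim (n : Nat) : ∀ (a : Int), 0 ≤ a → ∀ (s : List Int)
    (dq : List Int × List Int) (cw ccw : Std.HashMap Int Int) (cur : Int) (C : List Int),
    dqRotCW (dqAbs dq) = C → PvInv a cw ccw cur C →
    ((PySem.List.pyRange a (a + n) 1).foldl stepA (s, dq)).1 =
      ((PySem.List.pyRange a (a + n) 1).foldl stepB (s, (cw, ccw, cur))).1 := by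
  induction n with
  | zero =>
    intro a _ s dq cw ccw cur C _ _
    rw [pyRange_one_nil _ _ (by simp)]
    rfl
  | succ n ih =>
    intro a ha s dq cw ccw cur C habs hinv
    rw [PySem.List.pyRange_one_cons (by push_cast; omega)]
    simp only [List.foldl_cons]
    have hne : C ≠ [] := hinv.1
    have h23 : PySem.Int.mod (a + 1) 23 = 0 → 2 ≤ C.length := by
      intro hc
      have hmodeq : PySem.Int.mod (a + 1) 23 = (a + 1) % 23 :=
        PySem.Int.mod_eq_emod_of_pos (by norm_num)
      have hc' : (a + 1) % 23 = 0 := by rw [← hmodeq]; exact hc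
      have hlen := hinv.2.2.2.2.1
      omega
    obtain ⟨hr1, hr2⟩ := step_ref a s dq C habs hne h23
    obtain ⟨h1, h2⟩ := step_sim a ha s (dqAbs dq) cw ccw cur C habs hinv
    have hA : stepA (s, dq) a = ((stepA (s, dq) a).1, (stepA (s, dq) a).2) := rfl
    have hB : stepB (s, (cw, ccw, cur)) a =
        ((stepB (s, (cw, ccw, cur)) a).1, ((stepB (s, (cw, ccw, cur)) a).2.1,
          ((stepB (s, (cw, ccw, cur)) a).2.2.1, (stepB (s, (cw, ccw, cur)) a).2.2.2))) := rfl
    rw [hA, hB, ← h1, ← hr1]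
    have heq : a + 1 + (n : Int) = a + ((n + 1 : Nat) : Int) := by push_cast; ring
    have hC' : dqRotCW (dqAbs (stepA (s, dq) a).2)
        = dqRotCW ((listStepA (s, dqAbs dq) a).2) := by rw [hr2]
    have := ih (a + 1) (by omega) (stepA (s, dq) a).1 (stepA (s, dq) a).2
      (stepB (s, (cw, ccw, cur)) a).2.1 (stepB (s, (cw, ccw, cur)) a).2.2.1
      (stepB (s, (cw, ccw, cur)) a).2.2.2 (dqRotCW ((listStepA (s, dqAbs dq) a).2)) hC' h2
    rw [heq] at this
    exact this

theorem pvInv_init : PvInv 0 ((∅ : Std.HashMap Int Int).insert 0 0)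
    ((∅ : Std.HashMap Int Int).insert 0 0) 0 [0] := by
  refine ⟨by simp, by simp, rfl, by intro x hx; simp at hx; omega, by decide, ?_⟩
  intro p hp
  have hp00 : p = (0, 0) := by simpa [cyclicPairs, shiftZip] using hp
  subst hp00
  refine ⟨?_, ?_⟩ <;> rw [Std.HashMap.getD_insert_self]

theorem init_scores_eq (n : Int) :
    (PySem.List.pyRange 0 n 1).map (fun _ => (0 : Int)) = PySem.List.pyRepeat [(0 : Int)] n := by
  rw [PySem.List.pyRepeat_singleton]
  rw [List.eq_replicate_iff]
  constructor
  · simp [PySem.List.length_pyRange_one]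
  · intro b hb
    obtain ⟨a, -, rfl⟩ := List.mem_map.mp hb
    rfl

-- ===== VERDICT (by name: the statement is the Claim_ definition above) =====
theorem playFast_spec : Claim_equal_playFast := by
  intro rounds num_players _ _
  unfold Spec_playFast playFast playFast_alt
  rw [← init_scores_eq]
  by_cases hr : rounds ≤ 0
  · rw [pyRange_one_nil _ _ hr]
    rfl
  · have hn : rounds = 0 + ((rounds.toNat : Nat) : Int) := by omega
    rw [hn]
    exact fold_sim rounds.toNat 0 (le_refl 0) _ ([0], []) _ _ 0 [0] rfl pvInv_init
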